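-- pv_equiv track=rewrite | github.com/paiml/depyler | examples/hard_digit_manipulation.py | sum_digit_squares
-- ===== SOURCE A (Python) =====
-- def sum_digit_squares(n: int) -> int:
--     """Sum of squares of each digit."""
--     if n < 0:
--         n = -n
--     total: int = 0
--     while n > 0:
--         d: int = n % 10
--         total = total + d * d
--         n = n // 10
--     return total
-- ===== SOURCE B (Python) =====
-- def sum_digit_squares(n: int) -> int:
--     """Sum of squares of each digit."""
--     return sum((ord(c) - 48) ** 2 for c in str(abs(n)))
-- ===== Notes on version B (the rewrite author's own statement) =====
-- stated objective: idiomatic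
-- what changed: Replaces the explicit while-loop extracting digits with % and // by a one-line sum over the decimal string of abs(n), squaring each digit character's value.
import Mathlib
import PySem

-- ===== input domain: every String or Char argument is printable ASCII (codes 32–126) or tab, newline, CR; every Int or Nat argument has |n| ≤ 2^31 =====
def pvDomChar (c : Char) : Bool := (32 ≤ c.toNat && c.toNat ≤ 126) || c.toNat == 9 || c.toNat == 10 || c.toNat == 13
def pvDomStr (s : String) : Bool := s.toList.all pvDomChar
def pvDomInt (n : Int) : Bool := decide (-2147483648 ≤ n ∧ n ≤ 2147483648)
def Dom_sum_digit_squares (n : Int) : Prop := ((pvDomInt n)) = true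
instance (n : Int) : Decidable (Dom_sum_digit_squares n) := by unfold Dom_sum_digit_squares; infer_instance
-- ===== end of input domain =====

-- B replaces the %/​// digit-extraction loop by a sum over the decimal string of abs(n) (idiomatic, same cost).


-- ===== PORT A =====
-- the while loop: state (n, total), exits when n ≤ 0
def sumLoopA (n total : Int) : Int :=
  if 0 < n then
    sumLoopA (PySem.Int.floordiv n 10) (total + (PySem.Int.mod n 10) * (PySem.Int.mod n 10))
  else total
termination_by n.toNat
decreasing_by
  simp [PySem.Int.floordiv, Int.fdiv_eq_ediv]
  omega

def sum_digit_squares (n : Int) : Int :=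
  sumLoopA (if n < 0 then -n else n) 0

-- ===== PORT B =====
def sum_digit_squares_alt (n : Int) : Int :=
  ((PySem.Int.toStr |n|).toList.map (fun c => ((c.toNat : Int) - 48) ^ 2)).sum

-- ===== PRECONDITION & SPEC =====
def Spec_sum_digit_squares (n : Int) (out : Int) : Prop := out = sum_digit_squares_alt n
instance (n : Int) (out : Int) : Decidable (Spec_sum_digit_squares n out) := by unfold Spec_sum_digit_squares; infer_instance

-- ===== CLAIM (what is proved, stated in full; the proofs are below) =====
def Claim_equal_sum_digit_squares : Prop := ∀ (n : Int), Dom_sum_digit_squares n → Spec_sum_digit_squares n (sum_digit_squares n)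

-- ===== LEMMAS AND PROOFS =====

-- arithmetic sum of squares of decimal digits, on Nat
def sqsum (m : Nat) : Int :=
  if m = 0 then 0 else ((m % 10 : Nat) : Int) ^ 2 + sqsum (m / 10)

def fsq (c : Char) : Int := ((c.toNat : Int) - 48) ^ 2

lemma fsq_digitChar (d : Nat) (hd : d < 10) : fsq (Nat.digitChar d) = (d : Int) ^ 2 := by
  interval_cases d <;> decide

lemma toDigitsCore_sum (fuel : Nat) : ∀ n ds, n < fuel →
    ((Nat.toDigitsCore 10 fuel n ds).map fsq).sum = sqsum n + (ds.map fsq).sum := by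
  induction fuel with
  | zero => intro n ds h; omega
  | succ fuel ih =>
    intro n ds h
    rw [Nat.toDigitsCore]
    by_cases h0 : n / 10 = 0
    · simp only [h0, if_true]
      by_cases hn : n = 0
      · subst hn; simp [fsq, sqsum, Nat.digitChar]
      · rw [show sqsum n = ((n % 10 : Nat) : Int) ^ 2 + sqsum (n / 10) from by rw [sqsum, if_neg hn],
            h0, sqsum]
        simp [fsq_digitChar _ (Nat.mod_lt _ (by norm_num))]
    · rw [if_neg h0, ih _ _ (by omega),
          show sqsum n = ((n % 10 : Nat) : Int) ^ 2 + sqsum (n / 10) from by rw [sqsum, if_neg (by omega)]]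
      simp [fsq_digitChar _ (Nat.mod_lt _ (by norm_num))]
      ring

lemma sumLoopA_eq (m : Nat) : ∀ total, sumLoopA (m : Int) total = total + sqsum m := by
  induction m using Nat.strong_induction_on with
  | _ m ih =>
    intro total
    rw [sumLoopA]
    by_cases hm : m = 0
    · subst hm; simp [sqsum]
    · rw [if_pos (by exact_mod_cast Nat.pos_of_ne_zero hm)]
      have hfd : PySem.Int.floordiv (m : Int) 10 = ((m / 10 : Nat) : Int) := by
        simp [PySem.Int.floordiv, Int.fdiv_eq_ediv]
      have hmod : PySem.Int.mod (m : Int) 10 = ((m % 10 : Nat) : Int) := by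
        simp [PySem.Int.mod, Int.fmod_eq_emod]
      rw [hfd, hmod, ih (m / 10) (Nat.div_lt_self (Nat.pos_of_ne_zero hm) (by norm_num)),
          show sqsum m = ((m % 10 : Nat) : Int) ^ 2 + sqsum (m / 10) from by rw [sqsum, if_neg hm]]
      push_cast
      ring

-- ===== VERDICT (by name: the statement is the Claim_ definition above) =====
theorem sum_digit_squares_spec : Claim_equal_sum_digit_squares := by
  intro n _
  unfold Spec_sum_digit_squares sum_digit_squares sum_digit_squares_alt
  have habs : (if n < 0 then -n else n) = |n| := by
    rcases lt_or_ge n 0 with h | h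
    · simp [h, abs_of_neg h]
    · simp [not_lt.mpr h, abs_of_nonneg h]
  rw [habs]
  have h0 : (0:Int) ≤ |n| := abs_nonneg n
  have : |n| = ((|n|.toNat : Nat) : Int) := by omega
  rw [this, sumLoopA_eq, PySem.Int.toList_toStr, PySem.Int.toChars, if_neg (by omega),
      Int.toNat_natCast, Nat.toDigits,
      show (fun c => ((c.toNat : Int) - 48) ^ 2) = fsq from rfl,
      toDigitsCore_sum _ _ _ (by omega)]
  simp
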